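-- pv_equiv track=rewrite | github.com/phvietan/Make-Us-Great-Again | AnPham/Cryptopals/Set1/DetectAESInECBMode.py | countRepetitions
-- ===== SOURCE A (Python) =====
-- def countRepetitions(s, blocksize = 16):
--   check = {}
--   count = 0
--   for i in range(0, len(s), blocksize):
--     block = s[i:i+blocksize]
--     try:
--       if check[block]: count += 1
--     except: count += 0
--     check[block] = True
--   return count
-- ===== SOURCE B (Python) =====
-- def countRepetitions(s, blocksize = 16):
--   blocks = sorted(s[i:i+blocksize] for i in range(0, len(s), blocksize))
--   return sum(1 for prev, cur in zip(blocks, blocks[1:]) if prev == cur)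
-- ===== Notes on version B (the rewrite author's own statement) =====
-- stated objective: alternative
-- what changed: Sorts the block list and counts equal adjacent pairs in the sorted order, instead of A's single pass with a seen-dict and a running tally.
import Mathlib
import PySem

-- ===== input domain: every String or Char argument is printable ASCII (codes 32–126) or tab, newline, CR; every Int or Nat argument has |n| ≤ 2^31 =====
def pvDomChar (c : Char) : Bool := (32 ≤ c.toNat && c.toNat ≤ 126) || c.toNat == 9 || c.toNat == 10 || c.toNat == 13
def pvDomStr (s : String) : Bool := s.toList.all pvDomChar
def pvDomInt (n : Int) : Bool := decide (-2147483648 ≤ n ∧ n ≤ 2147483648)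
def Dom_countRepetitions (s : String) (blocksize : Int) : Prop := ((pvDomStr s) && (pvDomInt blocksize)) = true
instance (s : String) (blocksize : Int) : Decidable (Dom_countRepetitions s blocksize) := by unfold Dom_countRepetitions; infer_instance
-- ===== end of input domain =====

-- B sorts the block list and counts equal adjacent pairs instead of A's seen-dict running
-- tally; a different (sort-based) algorithm of similar cost. Equivalence proved on blocksize ≠ 0.

-- ===== PORT A =====
def countRepetitions (s : String) (blocksize : Int) : Int :=
  ((PySem.List.pyRange 0 (PySem.Str.len s) blocksize).foldl
    (fun (acc : PySem.Dict String Bool × Int) i =>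
      let block := PySem.Str.slice s (some i) (some (i + blocksize))
      let count :=
        match acc.1.get? block with          -- try: if check[block]: count += 1
        | some v => if v then acc.2 + 1 else acc.2
        | none => acc.2 + 0                  -- except: count += 0
      (acc.1.insert block true, count))      -- check[block] = True
    (PySem.Dict.empty, 0)).2

-- ===== PORT B =====
def countRepetitions_alt (s : String) (blocksize : Int) : Int :=
  let blocks := PySem.List.sorted
    ((PySem.List.pyRange 0 (PySem.Str.len s) blocksize).map
      (fun i => PySem.Str.slice s (some i) (some (i + blocksize))))
    (fun x => x) false
  (blocks.zip (PySem.List.slice blocks (some 1) none)).foldl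
    (fun (acc : Int) p => if p.1 = p.2 then acc + 1 else acc) 0

-- ===== PRECONDITION & SPEC =====
-- Python's range(0, len(s), blocksize) raises ValueError when the step is 0 (in A and in B alike).
def Pre_countRepetitions (s : String) (blocksize : Int) : Prop := blocksize ≠ 0
instance (s : String) (blocksize : Int) : Decidable (Pre_countRepetitions s blocksize) := by
  unfold Pre_countRepetitions; infer_instance
def pvWitness_countRepetitions : String × Int := ("abcdabcdxy", 4)

def Spec_countRepetitions (s : String) (blocksize : Int) (out : Int) : Prop := out = countRepetitions_alt s blocksize
instance (s : String) (blocksize : Int) (out : Int) : Decidable (Spec_countRepetitions s blocksize out) := by unfold Spec_countRepetitions; infer_instance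

-- ===== CLAIM (what is proved, stated in full; the proofs are below) =====
def Claim_equal_countRepetitions : Prop := ∀ (s : String) (blocksize : Int), Dom_countRepetitions s blocksize → Pre_countRepetitions s blocksize → Spec_countRepetitions s blocksize (countRepetitions s blocksize)

-- ===== LEMMAS AND PROOFS =====

-- A's loop body, as a function of the already-extracted block.
def pvStepA (acc : PySem.Dict String Bool × Int) (b : String) : PySem.Dict String Bool × Int :=
  let count :=
    match acc.1.get? b with
    | some v => if v then acc.2 + 1 else acc.2
    | none => acc.2 + 0
  (acc.1.insert b true, count)

-- A-side loop invariant: the tally plus the number of distinct blocks seen equals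
-- the number of blocks processed plus the blocks already known.
lemma pvLoopA (bs : List String) (d : PySem.Dict String Bool) (c : Int)
    (hval : ∀ k, d.get? k ≠ some false) :
    (bs.foldl pvStepA (d, c)).2 + ((PySem.Set.update d.keys bs).length : Int)
      = c + (bs.length : Int) + (d.keys.length : Int) := by
  induction bs generalizing d c with
  | nil => simp [PySem.Set.update]
  | cons b rest ih =>
    by_cases hb : b ∈ d.keys
    · have hget : d.get? b = some true := by
        cases hv : d.get? b with
        | none => exact absurd hb ((PySem.Dict.get?_eq_none_iff_not_mem_keys d b).mp hv)
        | some v =>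
          cases v with
          | false => exact absurd hv (hval b)
          | true => rfl
      have hkeys : (d.insert b true).keys = d.keys :=
        PySem.Dict.keys_insert_of_contains d true ((PySem.Dict.contains_iff_mem_keys d b).mpr hb)
      have hval' : ∀ k, (d.insert b true).get? k ≠ some false := by
        intro k
        rw [PySem.Dict.get?_insert]
        split_ifs with h
        · simp
        · exact hval k
      have hupd : PySem.Set.update d.keys (b :: rest) = PySem.Set.update d.keys rest := by
        simp only [PySem.Set.update, List.foldl_cons, PySem.Set.add_of_mem hb]
      have := ih (d.insert b true) (c + 1) hval'
      rw [hkeys] at this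
      simp only [List.foldl_cons, pvStepA, hget, hupd, List.length_cons]
      push_cast at this ⊢
      omega
    · have hget : d.get? b = none := (PySem.Dict.get?_eq_none_iff_not_mem_keys d b).mpr hb
      have hcf : d.contains b = false := by
        rcases Bool.eq_false_or_eq_true (d.contains b) with h | h
        · exact absurd ((PySem.Dict.contains_iff_mem_keys d b).mp h) hb
        · exact h
      have hkeys : (d.insert b true).keys = d.keys ++ [b] :=
        PySem.Dict.keys_insert_of_not_contains d true hcf
      have hval' : ∀ k, (d.insert b true).get? k ≠ some false := by
        intro k
        rw [PySem.Dict.get?_insert]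
        split_ifs with h
        · simp
        · exact hval k
      have hupd : PySem.Set.update d.keys (b :: rest) = PySem.Set.update (d.keys ++ [b]) rest := by
        simp only [PySem.Set.update, List.foldl_cons, PySem.Set.add_of_not_mem hb]
      have := ih (d.insert b true) (c + 0) hval'
      rw [hkeys] at this
      simp only [List.foldl_cons, pvStepA, hupd, List.length_cons, hget]
      simp only [List.length_append, List.length_cons, List.length_nil] at this
      push_cast at this ⊢
      omega

-- A's indexed loop is pvStepA folded over the (unsorted) block list.
lemma pvA_as_blocks (s : String) (blocksize : Int) :
    countRepetitions s blocksize =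
      (((PySem.List.pyRange 0 (PySem.Str.len s) blocksize).map
          (fun i => PySem.Str.slice s (some i) (some (i + blocksize)))).foldl
        pvStepA (PySem.Dict.empty, 0)).2 := by
  simp only [countRepetitions, List.foldl_map, pvStepA]

-- A's value: total blocks minus distinct blocks (stated additively).
lemma pvA_closed (s : String) (blocksize : Int)
    (bs : List String)
    (hbs : bs = (PySem.List.pyRange 0 (PySem.Str.len s) blocksize).map
      (fun i => PySem.Str.slice s (some i) (some (i + blocksize)))) :
    countRepetitions s blocksize + ((PySem.Set.ofList bs).length : Int) = (bs.length : Int) := by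
  rw [pvA_as_blocks, ← hbs]
  have h := pvLoopA bs PySem.Dict.empty 0 (by intro k; simp [PySem.Dict.get?_empty])
  have hemp : (PySem.Dict.empty : PySem.Dict String Bool).keys = [] := rfl
  rw [hemp] at h
  have hupd : PySem.Set.update ([] : PySem.Set String) bs = PySem.Set.ofList bs := by
    rw [PySem.Set.ofList_eq_foldl]; rfl
  rw [hupd] at h
  simp only [List.length_nil, Nat.cast_zero, add_zero] at h
  omega

-- The running +1 fold over a list of pairs counts the pairs satisfying the test.
lemma pvFoldCount (l : List (String × String)) (c : Int) :
    l.foldl (fun (acc : Int) p => if p.1 = p.2 then acc + 1 else acc) c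
      = c + (l.countP (fun p => decide (p.1 = p.2)) : Int) := by
  induction l generalizing c with
  | nil => simp
  | cons p t ih =>
    by_cases h : p.1 = p.2
    · simp [h, ih]
      push_cast
      ring
    · simp [h, ih]

-- On a ≤-sorted list, equal adjacent pairs count length-minus-distinct.
lemma pvAdjSorted (m : List String) (hm : m.Pairwise (· ≤ ·)) :
    (m.zip m.tail).countP (fun p => decide (p.1 = p.2)) + m.toFinset.card = m.length := by
  induction m with
  | nil => simp
  | cons a t ih =>
    cases t with
    | nil => simp
    | cons b t' =>
      have hpair := List.pairwise_cons.mp hm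
      have ih' := ih hpair.2
      have hzip : (a :: b :: t').zip (a :: b :: t').tail
          = (a, b) :: ((b :: t').zip (b :: t').tail) := by
        simp [List.zip]
      rw [hzip, List.countP_cons]
      by_cases hab : a = b
      · have hfs : (a :: b :: t').toFinset = (b :: t').toFinset := by
          rw [List.toFinset_cons, Finset.insert_eq_self]
          exact List.mem_toFinset.mpr (by simp [hab])
        rw [hfs, if_pos (by simp [hab])]
        simp only [List.length_cons] at ih' ⊢
        omega
      · have hnot : a ∉ (b :: t').toFinset := by
          rw [List.mem_toFinset]
          intro hmem
          rcases List.mem_cons.mp hmem with h | h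
          · exact hab h
          · exact hab (le_antisymm (hpair.1 b List.mem_cons_self)
              ((List.pairwise_cons.mp hpair.2).1 a h))
        rw [if_neg (by simp [hab]), List.toFinset_cons,
          Finset.card_insert_of_notMem hnot]
        simp only [List.length_cons] at ih' ⊢
        omega

-- distinct-count of a list = its toFinset card.
lemma pvOfListCard (l : List String) :
    (PySem.Set.ofList l).length = l.toFinset.card := by
  have hnd : (PySem.Set.ofList l).Nodup := PySem.Set.nodup_ofList l
  have hfs : (PySem.Set.ofList l).toFinset = l.toFinset := by
    apply Finset.ext
    intro x
    simp [List.mem_toFinset, PySem.Set.mem_ofList]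
  calc (PySem.Set.ofList l).length = (PySem.Set.ofList l).toFinset.card :=
        (List.toFinset_card_of_nodup hnd).symm
    _ = l.toFinset.card := by rw [hfs]

-- ===== VERDICT (by name: the statement is the Claim_ definition above) =====
theorem countRepetitions_spec : Claim_equal_countRepetitions := by
  intro s blocksize _ _
  unfold Spec_countRepetitions
  set bs := (PySem.List.pyRange 0 (PySem.Str.len s) blocksize).map
      (fun i => PySem.Str.slice s (some i) (some (i + blocksize))) with hbs
  set m := PySem.List.sorted bs (fun x => x) false with hm
  have halt : countRepetitions_alt s blocksize
      = (m.zip (PySem.List.slice m (some 1) none)).foldl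
          (fun (acc : Int) p => if p.1 = p.2 then acc + 1 else acc) 0 := rfl
  have htail : PySem.List.slice m (some 1) none = m.tail := PySem.List.slice_from_one m
  have hperm : m.Perm bs := PySem.List.sorted_perm bs (fun x => x) false
  have hsorted : m.Pairwise (· ≤ ·) := by
    have := PySem.List.sorted_pairwise bs (fun x => x)
    simpa using this
  have hadj := pvAdjSorted m hsorted
  have hA := pvA_closed s blocksize bs hbs
  rw [halt, htail, pvFoldCount]
  have hcard : m.toFinset.card = bs.toFinset.card := by rw [List.toFinset_eq_of_perm _ _ hperm]
  have hlen : m.length = bs.length := hperm.length_eq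
  have hof := pvOfListCard bs
  omega
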